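-- pv_equiv track=rewrite | github.com/JunYoungkKwon/Algorithm | programmers/5-1.py | solution
-- ===== SOURCE A (Python) =====
-- def solution(sizes):
--     max_w = 0
--     max_h = 0
--     for y, x in sizes:
--         h, w = max(y, x), min(y, x)
--         max_h = max(max_h, h)
--         max_w = max(max_w, w)
--
--     return max_w * max_h
-- ===== SOURCE B (Python) =====
-- def solution(sizes):
--     # Pool all 2n side lengths (plus a 0 sentinel) and sort: the largest value overall
--     # is the card height; sort the per-rectangle short sides: the largest is the width.
--     values = sorted([0] + [v for p in sizes for v in p])
--     mins = sorted([0] + [min(y, x) for y, x in sizes])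
--     return mins[-1] * values[-1]
-- ===== Notes on version B (the rewrite author's own statement) =====
-- stated objective: alternative
-- what changed: Instead of a fused loop maintaining two running maxima of per-pair max/min, B pools all side lengths into one flattened list (the card height is the global maximum of all 2n values, not a per-pair aggregate), sorts that pool and the list of per-pair short sides, and reads each extreme off as the last element of the sorted list.
import Mathlib
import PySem

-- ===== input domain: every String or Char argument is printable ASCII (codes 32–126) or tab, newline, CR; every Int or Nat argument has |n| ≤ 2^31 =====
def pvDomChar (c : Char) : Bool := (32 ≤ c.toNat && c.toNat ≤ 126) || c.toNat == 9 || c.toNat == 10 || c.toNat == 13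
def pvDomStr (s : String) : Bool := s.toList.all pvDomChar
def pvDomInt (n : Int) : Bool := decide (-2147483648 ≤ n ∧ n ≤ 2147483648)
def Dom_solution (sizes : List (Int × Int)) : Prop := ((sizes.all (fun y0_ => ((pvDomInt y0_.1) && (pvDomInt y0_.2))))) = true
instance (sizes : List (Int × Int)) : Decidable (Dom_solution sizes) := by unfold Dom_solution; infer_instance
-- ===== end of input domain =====

-- B pools all side lengths (plus a 0 sentinel), sorts, and reads the extremes off the
-- sorted lists' last elements, instead of A's fused loop with two running maxima;
-- objective: alternative (same result by a different mechanism, not faster).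

-- ===== PORT A =====
def solution (sizes : List (Int × Int)) : Int :=
  let r := sizes.foldl (fun (s : Int × Int) (p : Int × Int) =>
    let h := max p.1 p.2
    let w := min p.1 p.2
    (max s.1 w, max s.2 h)) (0, 0)   -- (max_w, max_h)
  r.1 * r.2

-- ===== PORT B =====
def solution_alt (sizes : List (Int × Int)) : Int :=
  let values := PySem.List.sorted ((0 : Int) :: sizes.flatMap (fun p => [p.1, p.2])) (fun v => v) false
  let mins := PySem.List.sorted ((0 : Int) :: sizes.map (fun p => min p.1 p.2)) (fun v => v) false
  -- both lists contain the literal 0, hence are nonempty: mins[-1]/values[-1] never raise,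
  -- so pyGet? is some here and the getD default is never used
  ((PySem.List.pyGet? mins (-1)).getD 0) * ((PySem.List.pyGet? values (-1)).getD 0)

-- ===== PRECONDITION & SPEC =====
def Spec_solution (sizes : List (Int × Int)) (out : Int) : Prop := out = solution_alt sizes
instance (sizes : List (Int × Int)) (out : Int) : Decidable (Spec_solution sizes out) := by unfold Spec_solution; infer_instance

-- ===== CLAIM (what is proved, stated in full; the proofs are below) =====
def Claim_equal_solution : Prop := ∀ (sizes : List (Int × Int)), Dom_solution sizes → Spec_solution sizes (solution sizes)

-- ===== LEMMAS AND PROOFS =====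

-- the last element of sorted(x :: ys) is the running maximum ys.foldl max x
theorem last_sorted_eq_foldl_max (x : Int) (ys : List Int) :
    (PySem.List.sorted (x :: ys) (fun v => v) false).getLast? = some (ys.foldl max x) := by
  have hperm := PySem.List.sorted_perm (x :: ys) (fun v => v) false
  have hmax := PySem.List.max?_id_cons x ys
  have hmem : ys.foldl max x ∈ x :: ys := PySem.List.max?_mem hmax
  have hub : ∀ y ∈ x :: ys, y ≤ ys.foldl max x := PySem.List.max?_isMax hmax
  have hne : PySem.List.sorted (x :: ys) (fun v => v) false ≠ [] := by
    intro h
    exact (List.cons_ne_nil x ys) ((PySem.List.sorted_eq_nil_iff (x :: ys) (fun v => v) false).mp h)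
  rw [List.getLast?_eq_some_getLast hne]
  congr 1
  have hlen : 0 < (PySem.List.sorted (x :: ys) (fun v => v) false).length :=
    List.length_pos_iff.mpr hne
  apply le_antisymm
  · exact hub _ (hperm.mem_iff.mp (List.getLast_mem hne))
  · obtain ⟨i, hi, hgi⟩ := List.getElem_of_mem (hperm.mem_iff.mpr hmem)
    rw [List.getLast_eq_getElem, ← hgi]
    exact PySem.List.sorted_id_getElem_mono (x :: ys) (by omega) (by omega)

-- A's fused loop splits into two independent mapped folds
theorem fused_eq_split (sizes : List (Int × Int)) : ∀ (a b : Int),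
    sizes.foldl (fun (s : Int × Int) (p : Int × Int) =>
      (max s.1 (min p.1 p.2), max s.2 (max p.1 p.2))) (a, b)
    = ((sizes.map (fun p => min p.1 p.2)).foldl max a,
       (sizes.map (fun p => max p.1 p.2)).foldl max b) := by
  induction sizes with
  | nil => intro a b; simp
  | cons p t ih => intro a b; simpa [List.foldl] using ih (max a (min p.1 p.2)) (max b (max p.1 p.2))

-- the running max over the flattened pairs equals the running max of the per-pair maxima
theorem flat_foldl_max (sizes : List (Int × Int)) : ∀ (a : Int),
    (sizes.flatMap (fun p => [p.1, p.2])).foldl max a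
    = (sizes.map (fun p => max p.1 p.2)).foldl max a := by
  induction sizes with
  | nil => intro a; simp
  | cons p t ih => intro a; simp [List.foldl, ih, max_assoc]

-- ===== VERDICT (by name: the statement is the Claim_ definition above) =====
theorem solution_spec : Claim_equal_solution := by
  intro sizes _
  unfold Spec_solution solution solution_alt
  simp only [fused_eq_split, PySem.List.pyGet?_neg_one, last_sorted_eq_foldl_max,
    Option.getD_some, flat_foldl_max]
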